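-- pv_equiv track=rewrite | github.com/MuyeedAhmed/AcceleratedUL | Utility&Test/TestingAgreeingPoints.py | find_agreeing_points
-- ===== SOURCE A (Python) =====
-- from itertools import combinations
--
-- def find_agreeing_points(clustering_outputs):
--     n = len(clustering_outputs)
--     agreeing_points = set(range(len(clustering_outputs[0])))
--
--     for i, j in combinations(range(n), 2):
--         points_i = set([k for k, c in enumerate(clustering_outputs[i]) if c == 1])
--         points_j = set([k for k, c in enumerate(clustering_outputs[j]) if c == 1])
--         agreeing_points = agreeing_points.intersection(points_i.intersection(points_j))
--
--     return agreeing_points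
-- ===== SOURCE B (Python) =====
-- def find_agreeing_points(clustering_outputs):
--     m = len(clustering_outputs[0])
--     if len(clustering_outputs) < 2:
--         return set(range(m))
--     return {k for k in range(m)
--             if all(k < len(c) and c[k] == 1 for c in clustering_outputs)}
-- ===== Notes on version B (the rewrite author's own statement) =====
-- stated objective: faster
-- what changed: Replaces the loop over all O(n^2) index pairs (each rebuilding both 1-position sets and intersecting) by a single pass that keeps each index k iff every clustering has a 1 at k, with the n<2 case returning all indices of the first clustering.
-- outside the precondition, e.g. on find_agreeing_points([]): A raises IndexError, B raises IndexError
import Mathlib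
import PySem

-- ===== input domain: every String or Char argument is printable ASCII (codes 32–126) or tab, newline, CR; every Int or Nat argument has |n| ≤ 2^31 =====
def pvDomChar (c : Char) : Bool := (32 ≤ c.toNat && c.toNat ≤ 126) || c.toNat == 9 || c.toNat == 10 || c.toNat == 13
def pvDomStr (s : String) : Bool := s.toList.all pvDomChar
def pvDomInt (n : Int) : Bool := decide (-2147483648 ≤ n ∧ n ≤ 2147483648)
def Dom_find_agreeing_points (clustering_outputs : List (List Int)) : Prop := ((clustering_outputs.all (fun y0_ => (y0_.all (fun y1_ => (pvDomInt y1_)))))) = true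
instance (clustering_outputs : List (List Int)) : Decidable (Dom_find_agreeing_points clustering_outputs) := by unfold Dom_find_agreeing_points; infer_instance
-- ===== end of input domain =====

-- B intersects the 1-positions of all clusterings in one pass instead of looping over all index pairs (measured faster; equivalence of the RETURN value, a set, proved below).

-- ===== PORT A =====
-- combinations(range(n), 2), in itertools order
def pvPairs (n : Nat) : List (Nat × Nat) :=
  (List.range n).flatMap (fun i => ((List.range n).filter (fun j => decide (i < j))).map (fun j => (i, j)))

-- set([k for k, c in enumerate(cl) if c == 1])
def pvOnes (c : List Int) : PySem.Set Int :=
  PySem.Set.ofList ((PySem.List.enumerate c).filterMap (fun p => if p.2 == 1 then some p.1 else none))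

def find_agreeing_points (clustering_outputs : List (List Int)) : List Int :=
  let n := clustering_outputs.length
  let ap0 : PySem.Set Int :=
    PySem.Set.ofList (PySem.List.pyRange 0 ((clustering_outputs.headD []).length) 1)
  (pvPairs n).foldl (fun ap ij =>
      let pi := pvOnes (clustering_outputs.getD ij.1 [])
      let pj := pvOnes (clustering_outputs.getD ij.2 [])
      PySem.Set.inter ap (PySem.Set.inter pi pj)) ap0

-- ===== PORT B =====
-- all(k < len(c) and c[k] == 1 for c in clustering_outputs)
def pvAgreeAt (clustering_outputs : List (List Int)) (k : Int) : Bool :=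
  clustering_outputs.all (fun c => decide (k < (c.length : Int)) && (PySem.List.pyGetD c k 0 == 1))

def find_agreeing_points_alt (clustering_outputs : List (List Int)) : List Int :=
  let m := (clustering_outputs.headD []).length
  if clustering_outputs.length < 2 then
    PySem.Set.ofList (PySem.List.pyRange 0 (m : Int) 1)
  else
    PySem.Set.ofList ((PySem.List.pyRange 0 (m : Int) 1).filter (fun k => pvAgreeAt clustering_outputs k))

-- ===== PRECONDITION & SPEC =====
-- Pre_ excludes only the empty list, on which A raises IndexError at clustering_outputs[0].
def Pre_find_agreeing_points (clustering_outputs : List (List Int)) : Prop :=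
  clustering_outputs ≠ []
instance (clustering_outputs : List (List Int)) : Decidable (Pre_find_agreeing_points clustering_outputs) := by unfold Pre_find_agreeing_points; infer_instance

def pvWitness_find_agreeing_points : List (List Int) := [[1, 0], [1, 1]]

def Spec_find_agreeing_points (clustering_outputs : List (List Int)) (out : List Int) : Prop := out = find_agreeing_points_alt clustering_outputs
instance (clustering_outputs : List (List Int)) (out : List Int) : Decidable (Spec_find_agreeing_points clustering_outputs out) := by unfold Spec_find_agreeing_points; infer_instance

-- ===== CLAIM (what is proved, stated in full; the proofs are below) =====
def Claim_equal_find_agreeing_points : Prop := ∀ (clustering_outputs : List (List Int)), Dom_find_agreeing_points clustering_outputs → Pre_find_agreeing_points clustering_outputs → Spec_find_agreeing_points clustering_outputs (find_agreeing_points clustering_outputs)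

-- ===== LEMMAS AND PROOFS =====

theorem inter_eq_filter (s t : List Int) :
    PySem.Set.inter s t = s.filter (fun x => PySem.Set.contains t x) := rfl

theorem foldl_inter {β : Type} (L : List β) (g : β → List Int) (s : List Int) :
    L.foldl (fun ap t => PySem.Set.inter ap (g t)) s
      = s.filter (fun x => L.all (fun t => PySem.Set.contains (g t) x)) := by
  induction L generalizing s with
  | nil => simp
  | cons t L ih =>
      rw [List.foldl_cons, inter_eq_filter, ih, List.filter_filter]
      apply List.filter_congr
      intro x _
      simp [Bool.and_comm]

theorem mem_pvPairs (n i j : Nat) : (i, j) ∈ pvPairs n ↔ i < j ∧ j < n := by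
  unfold pvPairs
  simp only [List.mem_flatMap, List.mem_map, List.mem_filter, List.mem_range]
  constructor
  · rintro ⟨a, ha, b, ⟨hb, hab⟩, h⟩
    cases h
    exact ⟨by simpa using hab, hb⟩
  · rintro ⟨hij, hjn⟩
    exact ⟨i, lt_trans hij hjn, j, ⟨hjn, by simpa using hij⟩, rfl⟩

theorem mem_pvOnes (cl : List Int) (x : Int) :
    x ∈ pvOnes cl ↔ 0 ≤ x ∧ x < (cl.length : Int) ∧ PySem.List.pyGetD cl x 0 = 1 := by
  unfold pvOnes
  rw [PySem.Set.mem_ofList, List.mem_filterMap]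
  constructor
  · rintro ⟨p, hp, hite⟩
    rw [PySem.List.mem_enumerate_iff] at hp
    obtain ⟨k, hk, rfl⟩ := hp
    by_cases h1 : cl[k]'hk = 1
    · rw [if_pos (by simpa using h1)] at hite
      obtain rfl : ((0 : Int) + k) = x := by simpa using hite
      refine ⟨by positivity, by push_cast; omega, ?_⟩
      have hg : PySem.List.pyGetD cl ((0 : Int) + (k : Int)) 0 = cl[k]'hk := by
        rw [zero_add, PySem.List.pyGetD_natCast]
        simp [List.getD_eq_getElem?_getD, hk]
      rw [hg]; exact h1
    · rw [if_neg (by simpa using h1)] at hite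
      cases hite
  · rintro ⟨hx0, hxlen, hget⟩
    obtain ⟨k, rfl⟩ := Int.eq_ofNat_of_zero_le hx0
    have hk : k < cl.length := by exact_mod_cast hxlen
    have h1 : cl[k]'hk = 1 := by
      rw [PySem.List.pyGetD_natCast, List.getD_eq_getElem?_getD] at hget
      simpa [hk] using hget
    refine ⟨((0 : Int) + k, cl[k]'hk), ?_, ?_⟩
    · rw [PySem.List.mem_enumerate_iff]; exact ⟨k, hk, rfl⟩
    · rw [if_pos (by simpa using h1)]
      simp

theorem contains_pvOnes (cl : List Int) (x : Int) (hx : 0 ≤ x) :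
    PySem.Set.contains (pvOnes cl) x
      = (decide (x < (cl.length : Int)) && (PySem.List.pyGetD cl x 0 == 1)) := by
  by_cases h : x ∈ pvOnes cl
  · have hmem := (mem_pvOnes cl x).mp h
    rw [(PySem.Set.contains_iff (pvOnes cl) x).mpr h]
    simp [hmem.2.1, hmem.2.2]
  · have hfalse : PySem.Set.contains (pvOnes cl) x = false := by
      rcases Bool.eq_false_or_eq_true (PySem.Set.contains (pvOnes cl) x) with ht | hf
      · exact absurd ((PySem.Set.contains_iff (pvOnes cl) x).mp ht) h
      · exact hf
    rw [hfalse, mem_pvOnes] at *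
    push_neg at h
    by_cases hlen : x < (cl.length : Int)
    · simp [hlen, h hx hlen]
    · simp [hlen]

-- main pointwise equivalence, for 0 ≤ x and at least two clusterings
theorem pairs_all_iff (co : List (List Int)) (x : Int) (hx : 0 ≤ x) (h2 : 2 ≤ co.length) :
    ((pvPairs co.length).all (fun ij =>
        PySem.Set.contains (PySem.Set.inter (pvOnes (co.getD ij.1 []))
          (pvOnes (co.getD ij.2 []))) x)) = pvAgreeAt co x := by
  have hcont : ∀ (s t : List Int),
      PySem.Set.contains (PySem.Set.inter s t) x
        = (PySem.Set.contains s x && PySem.Set.contains t x) := by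
    intro s t
    by_cases hs : x ∈ s <;> by_cases ht : x ∈ t
    · have hmi : x ∈ PySem.Set.inter s t := (PySem.Set.mem_inter _ _ _).mpr ⟨hs, ht⟩
      simp only [PySem.Set.contains_eq_listContains]
      simp [hmi, hs, ht]
    all_goals {
      have hni : x ∉ PySem.Set.inter s t := fun hmem => by
        rcases (PySem.Set.mem_inter _ _ _).mp hmem with ⟨h1, h2⟩
        first | exact hs h1 | exact ht h2
      simp only [PySem.Set.contains_eq_listContains]
      simp [hni, hs, ht] }
  unfold pvAgreeAt
  rw [Bool.eq_iff_iff, List.all_eq_true, List.all_eq_true]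
  constructor
  · intro hall c hc
    obtain ⟨i, hi, rfl⟩ := List.mem_iff_getElem.mp hc
    -- find a pair containing i
    set j : Nat := if i = 0 then 1 else 0 with hj
    have hij : i ≠ j := by
      by_cases h0 : i = 0 <;> simp [hj, h0]
    have hjlt : j < co.length := by
      by_cases h0 : i = 0 <;> simp [hj, h0] <;> omega
    have hpair : (min i j, max i j) ∈ pvPairs co.length := by
      rw [mem_pvPairs]
      omega
    have := hall _ hpair
    rw [hcont] at this
    have hmm : min i j = i ∨ max i j = i := by omega
    have hgetmin : co.getD (min i j) [] = co[min i j]'(by omega) :=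
      List.getD_eq_getElem co [] (by omega)
    have hgetmax : co.getD (max i j) [] = co[max i j]'(by omega) :=
      List.getD_eq_getElem co [] (by omega)
    rw [Bool.and_eq_true] at this
    rcases hmm with hmi | hmi
    · have h1 := this.1
      rw [hgetmin, contains_pvOnes _ _ hx] at h1
      simp only [hmi] at h1
      exact h1
    · have h1 := this.2
      rw [hgetmax, contains_pvOnes _ _ hx] at h1
      simp only [hmi] at h1
      exact h1
  · intro hall ij hij
    obtain ⟨i, j⟩ := ij
    rw [mem_pvPairs] at hij
    have hi : i < co.length := by omega
    have hgi : co.getD i [] = co[i] := List.getD_eq_getElem co [] hi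
    have hgj : co.getD j [] = co[j] := List.getD_eq_getElem co [] hij.2
    rw [hcont, hgi, hgj, contains_pvOnes _ _ hx, contains_pvOnes _ _ hx]
    rw [Bool.and_eq_true]
    exact ⟨hall _ (List.getElem_mem hi), hall _ (List.getElem_mem hij.2)⟩

theorem nodup_range_filter (m : Int) (p : Int → Bool) :
    ((PySem.List.pyRange 0 m 1).filter p).Nodup :=
  (PySem.List.nodup_pyRange_one 0 m).filter p

-- ===== VERDICT (by name: the statement is the Claim_ definition above) =====
theorem find_agreeing_points_spec : Claim_equal_find_agreeing_points := by
  intro co _ hpre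
  unfold Spec_find_agreeing_points find_agreeing_points find_agreeing_points_alt
  have hofl : PySem.Set.ofList (PySem.List.pyRange 0 ((co.headD []).length : Int) 1)
      = PySem.List.pyRange 0 ((co.headD []).length : Int) 1 :=
    PySem.Set.ofList_eq_self_of_nodup _ (PySem.List.nodup_pyRange_one _ _)
  simp only
  rw [foldl_inter, hofl]
  by_cases h2 : co.length < 2
  · -- n ≤ 1 : pvPairs is empty, both sides are the full range
    have hn : co.length = 1 := by
      cases co with
      | nil => exact absurd rfl hpre
      | cons a l => simp at h2 ⊢; omega
    rw [if_pos h2]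
    have : pvPairs co.length = [] := by rw [hn]; decide
    rw [this]
    exact List.filter_eq_self.mpr (fun a _ => rfl)
  · rw [if_neg h2]
    rw [PySem.Set.ofList_eq_self_of_nodup _ (nodup_range_filter _ _)]
    apply List.filter_congr
    intro x hxmem
    have hx0 : 0 ≤ x := (PySem.List.mem_pyRange_one.mp hxmem).1
    exact pairs_all_iff co x hx0 (by omega)
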